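-- pv_equiv track=rewrite | github.com/AllaAndreevna/Yandex-Algo-Training-6.0 | HW2/HW2_task9.py | study_order
-- ===== SOURCE A (Python) =====
-- def study_order(n, a, b, p):
--     algorithms = [(a[i], b[i], i + 1) for i in range(n)]
--
--     interest_sorted = sorted(algorithms, key=lambda x: (-x[0], -x[1], x[2]))
--     usefulness_sorted = sorted(algorithms, key=lambda x: (-x[1], -x[0], x[2]))
--
--     result = []
--     studied = set()
--
--     interest_index = 0
--     usefulness_index = 0
--
--     for mood in p:
--         if mood == 1:
--             while usefulness_index < n:
--                 if usefulness_sorted[usefulness_index][2] not in studied: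
--                     result.append(usefulness_sorted[usefulness_index][2])
--                     studied.add(usefulness_sorted[usefulness_index][2])
--                     usefulness_index += 1
--                     break
--                 usefulness_index += 1
--         else:
--             while interest_index < n:
--                 if interest_sorted[interest_index][2] not in studied:
--                     result.append(interest_sorted[interest_index][2])
--                     studied.add(interest_sorted[interest_index][2])
--                     interest_index += 1
--                     break
--                 interest_index += 1
--
--     return result
-- ===== SOURCE B (Python) =====
-- def study_order(n, a, b, p):
--     # No sorting: for each mood, a single scan selects the best unstudied
--     # algorithm by the mood's key (interest-first or usefulness-first,
--     # smaller index breaks ties), exactly a selection-by-maximum pass.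
--     items = [(a[i], b[i], i + 1) for i in range(n)]
--     studied = set()
--     result = []
--     for mood in p:
--         best = None
--         best_key = None
--         for x, y, idx in items:
--             if idx in studied:
--                 continue
--             k = (y, x, -idx) if mood == 1 else (x, y, -idx)
--             if best is None or best_key < k:
--                 best, best_key = idx, k
--         if best is not None:
--             result.append(best)
--             studied.add(best)
--     return result
-- ===== Notes on version B (the rewrite author's own statement) =====
-- stated objective: alternative
-- what changed: Replaces the two pre-sorted arrays with monotone skip-pointers by a per-mood selection-by-maximum scan over the unstudied items (no sorting, no pointers, one shared studied set).
import Mathlib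
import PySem

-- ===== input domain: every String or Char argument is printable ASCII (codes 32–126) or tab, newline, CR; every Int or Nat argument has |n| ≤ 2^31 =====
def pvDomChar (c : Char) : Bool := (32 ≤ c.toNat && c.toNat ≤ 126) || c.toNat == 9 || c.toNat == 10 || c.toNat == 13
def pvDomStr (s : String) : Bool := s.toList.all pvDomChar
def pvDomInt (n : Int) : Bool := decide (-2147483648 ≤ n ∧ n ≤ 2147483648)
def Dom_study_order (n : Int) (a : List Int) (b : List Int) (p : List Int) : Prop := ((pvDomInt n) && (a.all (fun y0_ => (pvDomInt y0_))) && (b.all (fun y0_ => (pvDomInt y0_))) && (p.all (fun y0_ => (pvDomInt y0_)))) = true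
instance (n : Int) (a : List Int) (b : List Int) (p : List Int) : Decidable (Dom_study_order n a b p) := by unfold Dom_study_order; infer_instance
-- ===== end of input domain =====

-- B replaces the two pre-sorted arrays with monotone skip-pointers by a direct
-- selection-by-maximum scan over the unstudied items for each mood (objective: alternative).

-- Python's lexicographic 3-tuple sort/compare keys live in this lex-ordered type.
abbrev PvK3 : Type := Lex (Int × Lex (Int × Int))
abbrev PvTrip : Type := Int × Int × Int

-- the comprehension [(a[i], b[i], i + 1) for i in range(n)] (identical line in A and B)
def pvMkAlgs (n : Int) (a : List Int) (b : List Int) : List PvTrip :=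
  (PySem.List.pyRange 0 n 1).map (fun i => (PySem.List.pyGetD a i 0, PySem.List.pyGetD b i 0, i + 1))

-- ===== PORT A =====
-- sort key (-x[0], -x[1], x[2])
def pvKeyI (x : PvTrip) : PvK3 := toLex (-x.1, toLex (-x.2.1, x.2.2))
-- sort key (-x[1], -x[0], x[2])
def pvKeyU (x : PvTrip) : PvK3 := toLex (-x.2.1, toLex (-x.1, x.2.2))

-- the inner 'while index < n: … break' loop, on the suffix of the sorted list that starts
-- at the current pointer (the sorted lists have exactly max(n,0) elements, so 'index < n'
-- is exactly 'the suffix is nonempty'); returns the appended value (if any) and the new suffix.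
def pvScanA (st : PySem.Set Int) : List PvTrip → Option Int × List PvTrip
  | [] => (none, [])
  | x :: rest =>
    if PySem.Set.contains st x.2.2 then pvScanA st rest
    else (some x.2.2, rest)

-- one iteration of A's 'for mood in p' loop; state = (result, studied, interest suffix, usefulness suffix)
def pvStepA (s : List Int × PySem.Set Int × List PvTrip × List PvTrip) (mood : Int) :
    List Int × PySem.Set Int × List PvTrip × List PvTrip :=
  let (res, st, iR, uR) := s
  if mood == 1 then
    match pvScanA st uR with
    | (some v, uR') => (res ++ [v], PySem.Set.add st v, iR, uR')
    | (none, uR') => (res, st, iR, uR')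
  else
    match pvScanA st iR with
    | (some v, iR') => (res ++ [v], PySem.Set.add st v, iR', uR)
    | (none, iR') => (res, st, iR', uR)

def study_order (n : Int) (a : List Int) (b : List Int) (p : List Int) : List Int :=
  let algorithms := pvMkAlgs n a b
  let interestSorted := PySem.List.sorted algorithms pvKeyI
  let usefulnessSorted := PySem.List.sorted algorithms pvKeyU
  (p.foldl pvStepA ([], PySem.Set.empty, interestSorted, usefulnessSorted)).1

-- ===== PORT B =====
-- the mood-dependent comparison tuple k = (y, x, -idx) resp. (x, y, -idx)
def pvKeyBU (x : PvTrip) : PvK3 := toLex (x.2.1, toLex (x.1, -x.2.2))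
def pvKeyBI (x : PvTrip) : PvK3 := toLex (x.1, toLex (x.2.1, -x.2.2))

-- body of B's inner 'for x, y, idx in items' selection loop
def pvPickStep (st : PySem.Set Int) (mood : Int) (best : Option (Int × PvK3)) (x : PvTrip) :
    Option (Int × PvK3) :=
  if PySem.Set.contains st x.2.2 then best
  else
    let k := if mood == 1 then pvKeyBU x else pvKeyBI x
    match best with
    | none => some (x.2.2, k)
    | some (bi, bk) => if bk < k then some (x.2.2, k) else some (bi, bk)

-- one iteration of B's 'for mood in p' loop; state = (result, studied)
def pvStepB (items : List PvTrip) (s : List Int × PySem.Set Int) (mood : Int) :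
    List Int × PySem.Set Int :=
  let (res, st) := s
  match items.foldl (pvPickStep st mood) none with
  | some (v, _) => (res ++ [v], PySem.Set.add st v)
  | none => (res, st)

def study_order_alt (n : Int) (a : List Int) (b : List Int) (p : List Int) : List Int :=
  let items := pvMkAlgs n a b
  (p.foldl (pvStepB items) ([], PySem.Set.empty)).1

-- ===== PRECONDITION & SPEC =====
-- A raises IndexError (a[i] / b[i] inside the comprehension) iff n exceeds the length of a or b.
def Pre_study_order (n : Int) (a : List Int) (b : List Int) (p : List Int) : Prop :=
  n ≤ (a.length : Int) ∧ n ≤ (b.length : Int)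
instance (n : Int) (a : List Int) (b : List Int) (p : List Int) : Decidable (Pre_study_order n a b p) := by unfold Pre_study_order; infer_instance

def pvWitness_study_order : Int × List Int × List Int × List Int := (3, [1, 2, 3], [3, 1, 2], [0, 1, 0])

def Spec_study_order (n : Int) (a : List Int) (b : List Int) (p : List Int) (out : List Int) : Prop := out = study_order_alt n a b p
instance (n : Int) (a : List Int) (b : List Int) (p : List Int) (out : List Int) : Decidable (Spec_study_order n a b p out) := by unfold Spec_study_order; infer_instance

-- ===== CLAIM (what is proved, stated in full; the proofs are below) =====
def Claim_equal_study_order : Prop := ∀ (n : Int) (a : List Int) (b : List Int) (p : List Int), Dom_study_order n a b p → Pre_study_order n a b p → Spec_study_order n a b p (study_order n a b p)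

-- ===== LEMMAS AND PROOFS =====

-- membership in a PySem.Set after add
lemma pv_contains_add_self (s : PySem.Set Int) (v : Int) :
    PySem.Set.contains (PySem.Set.add s v) v = true := by
  simp [PySem.Set.add, PySem.Set.contains]; split_ifs with h <;> simp_all

lemma pv_contains_add_of (s : PySem.Set Int) (v w : Int)
    (h : PySem.Set.contains s w = true) :
    PySem.Set.contains (PySem.Set.add s v) w = true := by
  simp [PySem.Set.add, PySem.Set.contains] at *; split_ifs <;> simp_all

-- the sort keys are injective (the index component determines the item)
lemma pvKeyI_inj (x y : PvTrip) (h : pvKeyI x = pvKeyI y) : x = y := by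
  obtain ⟨a, b, c⟩ := x; obtain ⟨d, e, f⟩ := y
  simp [pvKeyI] at h; simp_all

lemma pvKeyU_inj (x y : PvTrip) (h : pvKeyU x = pvKeyU y) : x = y := by
  obtain ⟨a, b, c⟩ := x; obtain ⟨d, e, f⟩ := y
  simp [pvKeyU] at h; simp_all

-- B's max-keys are exactly A's min-keys, reversed
lemma pvRel_BI (x y : PvTrip) : pvKeyBI x ≤ pvKeyBI y ↔ pvKeyI y ≤ pvKeyI x := by
  simp [pvKeyBI, pvKeyI, Prod.Lex.le_iff]; omega

lemma pvRel_BU (x y : PvTrip) : pvKeyBU x ≤ pvKeyBU y ↔ pvKeyU y ≤ pvKeyU x := by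
  simp [pvKeyBU, pvKeyU, Prod.Lex.le_iff]; omega

-- B's inner loop with the mood resolved to a fixed key function
def pvPickStepK (st : PySem.Set Int) (kb : PvTrip → PvK3) (best : Option (Int × PvK3)) (x : PvTrip) :
    Option (Int × PvK3) :=
  if PySem.Set.contains st x.2.2 then best
  else
    match best with
    | none => some (x.2.2, kb x)
    | some (bi, bk) => if bk < kb x then some (x.2.2, kb x) else some (bi, bk)

lemma pvPickStep_eq_K (st : PySem.Set Int) (mood : Int) :
    pvPickStep st mood = pvPickStepK st (if mood == 1 then pvKeyBU else pvKeyBI) := by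
  funext best x; cases h : mood == 1 <;> simp [pvPickStep, pvPickStepK, h]

-- full characterisation of B's selection fold
lemma pv_best_aux (st : PySem.Set Int) (kb : PvTrip → PvK3) :
    ∀ (items : List PvTrip) (acc : Option (Int × PvK3)),
      (items.foldl (pvPickStepK st kb) acc = none →
        acc = none ∧ ∀ x ∈ items, PySem.Set.contains st x.2.2 = true) ∧
      (∀ i kk, items.foldl (pvPickStepK st kb) acc = some (i, kk) →
        (acc = some (i, kk) ∨ ∃ m ∈ items, PySem.Set.contains st m.2.2 = false ∧ i = m.2.2 ∧ kk = kb m) ∧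
        (∀ y ∈ items, PySem.Set.contains st y.2.2 = false → kb y ≤ kk) ∧
        (∀ bi bk, acc = some (bi, bk) → bk ≤ kk)) := by
  intro items
  induction items with
  | nil =>
    intro acc
    refine ⟨?_, ?_⟩
    · intro h; simp at h; exact ⟨h, by simp⟩
    · intro i kk h
      simp at h
      refine ⟨Or.inl h, by simp, ?_⟩
      intro bi bk hb
      rw [hb] at h
      injection h with h'
      injection h' with e1 e2
      rw [e2]
  | cons x t ih =>
    intro acc
    by_cases hx : PySem.Set.contains st x.2.2 = true
    · have hstep : pvPickStepK st kb acc x = acc := by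
        simp [pvPickStepK, show x.2.2 ∈ st by simpa using hx]
      constructor
      · intro h; rw [List.foldl_cons, hstep] at h
        obtain ⟨h1, h2⟩ := (ih acc).1 h
        exact ⟨h1, by intro y hy; rcases List.mem_cons.1 hy with rfl | hy'; exact hx; exact h2 y hy'⟩
      · intro i kk h; rw [List.foldl_cons, hstep] at h
        obtain ⟨h1, h2, h3⟩ := (ih acc).2 i kk h
        refine ⟨?_, ?_, h3⟩
        · rcases h1 with h1 | ⟨m, hm, hmu, rfl, rfl⟩
          · exact Or.inl h1
          · exact Or.inr ⟨m, List.mem_cons_of_mem _ hm, hmu, rfl, rfl⟩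
        · intro y hy hyu; rcases List.mem_cons.1 hy with rfl | hy'
          · rw [hx] at hyu; cases hyu
          · exact h2 y hy' hyu
    · have hxf : PySem.Set.contains st x.2.2 = false := by simpa using hx
      cases acc with
      | none =>
        have hstep : pvPickStepK st kb none x = some (x.2.2, kb x) := by
          simp [pvPickStepK, show x.2.2 ∉ st by simpa using hxf]
        constructor
        · intro h; rw [List.foldl_cons, hstep] at h
          obtain ⟨h1, _⟩ := (ih _).1 h; cases h1
        · intro i kk h; rw [List.foldl_cons, hstep] at h
          obtain ⟨h1, h2, h3⟩ := (ih _).2 i kk h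
          have hxle : kb x ≤ kk := h3 _ _ rfl
          refine ⟨?_, ?_, by intro bi bk hb; cases hb⟩
          · rcases h1 with h1 | ⟨m, hm, hmu, rfl, rfl⟩
            · injection h1 with h1'; injection h1' with e1 e2
              exact Or.inr ⟨x, List.mem_cons_self, hxf, e1.symm, e2.symm⟩
            · exact Or.inr ⟨m, List.mem_cons_of_mem _ hm, hmu, rfl, rfl⟩
          · intro y hy hyu; rcases List.mem_cons.1 hy with rfl | hy'
            · exact hxle
            · exact h2 y hy' hyu
      | some bb =>
        obtain ⟨bi0, bk0⟩ := bb
        by_cases hlt : bk0 < kb x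
        · have hstep : pvPickStepK st kb (some (bi0, bk0)) x = some (x.2.2, kb x) := by
            simp [pvPickStepK, show x.2.2 ∉ st by simpa using hxf, hlt]
          constructor
          · intro h; rw [List.foldl_cons, hstep] at h
            obtain ⟨h1, _⟩ := (ih _).1 h; cases h1
          · intro i kk h; rw [List.foldl_cons, hstep] at h
            obtain ⟨h1, h2, h3⟩ := (ih _).2 i kk h
            have hxle : kb x ≤ kk := h3 _ _ rfl
            refine ⟨?_, ?_, ?_⟩
            · rcases h1 with h1 | ⟨m, hm, hmu, rfl, rfl⟩
              · injection h1 with h1'; injection h1' with e1 e2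
                exact Or.inr ⟨x, List.mem_cons_self, hxf, e1.symm, e2.symm⟩
              · exact Or.inr ⟨m, List.mem_cons_of_mem _ hm, hmu, rfl, rfl⟩
            · intro y hy hyu; rcases List.mem_cons.1 hy with rfl | hy'
              · exact hxle
              · exact h2 y hy' hyu
            · intro bi bk hb; injection hb with hb'; injection hb' with e1 e2
              subst e1; subst e2; exact le_of_lt (lt_of_lt_of_le hlt hxle)
        · have hstep : pvPickStepK st kb (some (bi0, bk0)) x = some (bi0, bk0) := by
            simp [pvPickStepK, show x.2.2 ∉ st by simpa using hxf, hlt]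
          have hxle0 : kb x ≤ bk0 := le_of_not_gt hlt
          constructor
          · intro h; rw [List.foldl_cons, hstep] at h
            obtain ⟨h1, _⟩ := (ih _).1 h; cases h1
          · intro i kk h; rw [List.foldl_cons, hstep] at h
            obtain ⟨h1, h2, h3⟩ := (ih _).2 i kk h
            have hble : bk0 ≤ kk := h3 _ _ rfl
            refine ⟨?_, ?_, ?_⟩
            · rcases h1 with h1 | ⟨m, hm, hmu, rfl, rfl⟩
              · exact Or.inl h1
              · exact Or.inr ⟨m, List.mem_cons_of_mem _ hm, hmu, rfl, rfl⟩
            · intro y hy hyu; rcases List.mem_cons.1 hy with rfl | hy'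
              · exact le_trans hxle0 hble
              · exact h2 y hy' hyu
            · intro bi bk hb; injection hb with hb'; injection hb' with e1 e2
              subst e2; exact hble

-- characterisation of A's inner while-scan
lemma pvScanA_none (st : PySem.Set Int) :
    ∀ R R', pvScanA st R = (none, R') → R' = [] ∧ ∀ x ∈ R, PySem.Set.contains st x.2.2 = true := by
  intro R; induction R with
  | nil => intro R' h; simp [pvScanA] at h; exact ⟨h, by simp⟩
  | cons x t ih =>
    intro R' h
    by_cases hx : PySem.Set.contains st x.2.2 = true
    · rw [pvScanA, if_pos hx] at h
      obtain ⟨h1, h2⟩ := ih R' h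
      exact ⟨h1, by intro y hy; rcases List.mem_cons.1 hy with rfl | hy'; exact hx; exact h2 y hy'⟩
    · rw [pvScanA, if_neg hx] at h; cases h

lemma pvScanA_some (st : PySem.Set Int) :
    ∀ R v R', pvScanA st R = (some v, R') →
      ∃ q x, R = q ++ x :: R' ∧ (∀ y ∈ q, PySem.Set.contains st y.2.2 = true) ∧
        PySem.Set.contains st x.2.2 = false ∧ v = x.2.2 := by
  intro R; induction R with
  | nil => intro v R' h; simp [pvScanA] at h
  | cons x t ih =>
    intro v R' h
    by_cases hx : PySem.Set.contains st x.2.2 = true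
    · rw [pvScanA, if_pos hx] at h
      obtain ⟨q, z, hq, hqs, hzu, hv⟩ := ih v R' h
      exact ⟨x :: q, z, by rw [hq]; rfl,
        by intro y hy; rcases List.mem_cons.1 hy with rfl | hy'; exact hx; exact hqs y hy', hzu, hv⟩
    · rw [pvScanA, if_neg hx] at h
      injection h with h1 h2
      exact ⟨[], x, by rw [h2]; rfl, by simp, by simpa using hx, by injection h1.symm⟩

-- one mood-branch: A's pointer-scan over the sorted suffix picks the same item as B's
-- selection-by-maximum scan, and the suffix invariant is re-established
lemma pv_branch (items : List PvTrip) (k kb : PvTrip → PvK3)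
    (hinj : ∀ x y : PvTrip, k x = k y → x = y)
    (hrel : ∀ x y : PvTrip, kb x ≤ kb y ↔ k y ≤ k x)
    (st : PySem.Set Int) (R pre : List PvTrip)
    (hdec : PySem.List.sorted items k = pre ++ R)
    (hpre : ∀ x ∈ pre, PySem.Set.contains st x.2.2 = true) :
    (∀ R', pvScanA st R = (none, R') →
      items.foldl (pvPickStepK st kb) none = none ∧ R' = [] ∧
      ∀ x ∈ PySem.List.sorted items k, PySem.Set.contains st x.2.2 = true) ∧
    (∀ v R', pvScanA st R = (some v, R') →
      (∃ kk, items.foldl (pvPickStepK st kb) none = some (v, kk)) ∧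
      ∃ pre', PySem.List.sorted items k = pre' ++ R' ∧
        ∀ x ∈ pre', PySem.Set.contains (PySem.Set.add st v) x.2.2 = true) := by
  have hmemS : ∀ x, x ∈ PySem.List.sorted items k ↔ x ∈ items := fun x =>
    (PySem.List.sorted_perm items k false).mem_iff
  constructor
  · intro R' h
    obtain ⟨hR', hall⟩ := pvScanA_none st R R' h
    have hsorted : ∀ x ∈ PySem.List.sorted items k, PySem.Set.contains st x.2.2 = true := by
      intro x hx; rw [hdec] at hx
      rcases List.mem_append.1 hx with hx | hx
      · exact hpre x hx
      · exact hall x hx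
    refine ⟨?_, hR', hsorted⟩
    cases hf : items.foldl (pvPickStepK st kb) none with
    | none => rfl
    | some ik =>
      obtain ⟨i, kk⟩ := ik
      obtain ⟨h1, _, _⟩ := (pv_best_aux st kb items none).2 i kk hf
      rcases h1 with h1 | ⟨m, hm, hmu, _, _⟩
      · cases h1
      · rw [hsorted m ((hmemS m).2 hm)] at hmu; cases hmu
  · intro v R' h
    obtain ⟨q, x, hq, hqs, hxu, hv⟩ := pvScanA_some st R v R' h
    have hdec' : PySem.List.sorted items k = (pre ++ q) ++ x :: R' := by
      rw [hdec, hq, List.append_assoc]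
    -- x is k-minimal among unstudied items
    have hxmem : x ∈ items := (hmemS x).1 (by rw [hdec']; simp)
    have hmin : ∀ y ∈ items, PySem.Set.contains st y.2.2 = false → k x ≤ k y := by
      intro y hy hyu
      have hyS : y ∈ PySem.List.sorted items k := (hmemS y).2 hy
      rw [hdec'] at hyS
      rcases List.mem_append.1 hyS with hyS | hyS
      · rcases List.mem_append.1 hyS with hyS | hyS
        · rw [hpre y hyS] at hyu; cases hyu
        · rw [hqs y hyS] at hyu; cases hyu
      · rcases List.mem_cons.1 hyS with rfl | hyS
        · exact le_refl _
        · have hpw : (PySem.List.sorted items k).Pairwise (fun a b => k a ≤ k b) :=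
            PySem.List.sorted_pairwise items k
          rw [hdec'] at hpw
          have hpw2 : (x :: R').Pairwise (fun a b => k a ≤ k b) :=
            hpw.sublist (List.sublist_append_right _ _)
          exact (List.pairwise_cons.1 hpw2).1 y hyS
    constructor
    · cases hf : items.foldl (pvPickStepK st kb) none with
      | none =>
        obtain ⟨_, hall⟩ := (pv_best_aux st kb items none).1 hf
        rw [hall x hxmem] at hxu; cases hxu
      | some ik =>
        obtain ⟨i, kk⟩ := ik
        obtain ⟨h1, h2, _⟩ := (pv_best_aux st kb items none).2 i kk hf
        rcases h1 with h1 | ⟨m, hm, hmu, rfl, rfl⟩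
        · cases h1
        · have h3 : kb x ≤ kb m := h2 x hxmem hxu
          have h4 : k m ≤ k x := (hrel x m).1 h3
          have h5 : k x ≤ k m := hmin m hm hmu
          have h6 : x = m := hinj x m (le_antisymm h5 h4)
          exact ⟨kb m, by rw [hv, h6]⟩
    · refine ⟨(pre ++ q) ++ [x], by rw [hdec']; simp, ?_⟩
      intro y hy
      rcases List.mem_append.1 hy with hy | hy
      · rcases List.mem_append.1 hy with hy | hy
        · exact pv_contains_add_of st v _ (hpre y hy)
        · exact pv_contains_add_of st v _ (hqs y hy)
      · rcases List.mem_singleton.1 hy with rfl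
        rw [hv]; exact pv_contains_add_self st y.2.2

-- the suffix invariants for the two sorted lists
def pvInv (items : List PvTrip) (k : PvTrip → PvK3) (st : PySem.Set Int) (R : List PvTrip) : Prop :=
  ∃ pre, PySem.List.sorted items k = pre ++ R ∧ ∀ x ∈ pre, PySem.Set.contains st x.2.2 = true

lemma pvInv_mono (items : List PvTrip) (k : PvTrip → PvK3) (st : PySem.Set Int) (v : Int)
    (R : List PvTrip) (h : pvInv items k st R) : pvInv items k (PySem.Set.add st v) R := by
  obtain ⟨pre, h1, h2⟩ := h
  exact ⟨pre, h1, fun x hx => pv_contains_add_of st v _ (h2 x hx)⟩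

-- one 'for mood in p' iteration: A's step and B's step produce the same (result, studied)
lemma pv_step (items : List PvTrip) (st : PySem.Set Int) (iR uR : List PvTrip)
    (mood : Int) (res : List Int)
    (hI : pvInv items pvKeyI st iR) (hU : pvInv items pvKeyU st uR) :
    ∃ res' st' iR' uR',
      pvStepA (res, st, iR, uR) mood = (res', st', iR', uR') ∧
      pvStepB items (res, st) mood = (res', st') ∧
      pvInv items pvKeyI st' iR' ∧ pvInv items pvKeyU st' uR' := by
  cases hm : mood == 1
  · -- interest branch
    obtain ⟨preI, hdecI, hpreI⟩ := hI
    have hbr := pv_branch items pvKeyI pvKeyBI pvKeyI_inj pvRel_BI st iR preI hdecI hpreI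
    cases hscan : pvScanA st iR with
    | mk o iR' =>
      cases o with
      | none =>
        obtain ⟨hf, hR', hall⟩ := hbr.1 iR' hscan
        refine ⟨res, st, iR', uR, ?_, ?_, ?_, hU⟩
        · simp [pvStepA, hm, hscan]
        · simp [pvStepB, pvPickStep_eq_K, hm, hf]
        · exact ⟨PySem.List.sorted items pvKeyI, by rw [hR']; simp, hall⟩
      | some v =>
        obtain ⟨⟨kk, hf⟩, pre', hdec', hpre'⟩ := hbr.2 v iR' hscan
        refine ⟨res ++ [v], PySem.Set.add st v, iR', uR, ?_, ?_, ⟨pre', hdec', hpre'⟩,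
          pvInv_mono items pvKeyU st v uR hU⟩
        · simp [pvStepA, hm, hscan]
        · simp [pvStepB, pvPickStep_eq_K, hm, hf]
  · -- usefulness branch
    obtain ⟨preU, hdecU, hpreU⟩ := hU
    have hbr := pv_branch items pvKeyU pvKeyBU pvKeyU_inj pvRel_BU st uR preU hdecU hpreU
    cases hscan : pvScanA st uR with
    | mk o uR' =>
      cases o with
      | none =>
        obtain ⟨hf, hR', hall⟩ := hbr.1 uR' hscan
        refine ⟨res, st, iR, uR', ?_, ?_, hI, ?_⟩
        · simp [pvStepA, hm, hscan]
        · simp [pvStepB, pvPickStep_eq_K, hm, hf]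
        · exact ⟨PySem.List.sorted items pvKeyU, by rw [hR']; simp, hall⟩
      | some v =>
        obtain ⟨⟨kk, hf⟩, pre', hdec', hpre'⟩ := hbr.2 v uR' hscan
        refine ⟨res ++ [v], PySem.Set.add st v, iR, uR', ?_, ?_,
          pvInv_mono items pvKeyI st v iR hI, ⟨pre', hdec', hpre'⟩⟩
        · simp [pvStepA, hm, hscan]
        · simp [pvStepB, pvPickStep_eq_K, hm, hf]

lemma pv_loop (items : List PvTrip) :
    ∀ (p : List Int) (res : List Int) (st : PySem.Set Int) (iR uR : List PvTrip),
      pvInv items pvKeyI st iR → pvInv items pvKeyU st uR →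
      (p.foldl pvStepA (res, st, iR, uR)).1 = (p.foldl (pvStepB items) (res, st)).1 := by
  intro p
  induction p with
  | nil => intro res st iR uR _ _; rfl
  | cons mood t ih =>
    intro res st iR uR hI hU
    obtain ⟨res', st', iR', uR', hA, hB, hI', hU'⟩ := pv_step items st iR uR mood res hI hU
    rw [List.foldl_cons, List.foldl_cons, hA, hB]
    exact ih res' st' iR' uR' hI' hU'

-- ===== VERDICT (by name: the statement is the Claim_ definition above) =====
theorem study_order_spec : Claim_equal_study_order := by
  intro n a b p _hDom _hPre
  unfold Spec_study_order study_order study_order_alt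
  exact pv_loop (pvMkAlgs n a b) p [] PySem.Set.empty _ _
    ⟨[], rfl, by simp⟩ ⟨[], rfl, by simp⟩
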